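-- pv_equiv track=rewrite | github.com/LeonardoRCosta/CP4-Python | monitoramento.py | pega_menor_maior
-- ===== SOURCE A (Python) =====
-- def pega_menor_maior(temperaturas):
--     '''
--     Função que busca a menor e a maior temperatura em uma matriz de temperaturas
--     parâmetro: temperaturas -> Matriz contendo temperaturas
--     retorno: maior_menor -> Lista contendo a menor e a maior temperatura respectivamente
--     '''
--     menor = temperaturas[0][0]
--     maior = temperaturas[0][0]
--     for semana in temperaturas:
--       for temperatura in semana:
--         if temperatura > maior:
--             maior = temperatura
--         if temperatura < menor:
--             menor = temperatura
--     menor_maior = [menor, maior]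
--     return menor_maior
-- ===== SOURCE B (Python) =====
-- def pega_menor_maior(temperaturas):
--     todas = [temperatura for semana in temperaturas for temperatura in semana]
--     return [min(todas), max(todas)]
-- ===== Notes on version B (the rewrite author's own statement) =====
-- stated objective: idiomatic
-- what changed: The interleaved nested-loop comparison pass with a seeded running min/max pair is replaced by flattening the matrix once and taking the builtin min and max of the flat list in two library scans.
import Mathlib
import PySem

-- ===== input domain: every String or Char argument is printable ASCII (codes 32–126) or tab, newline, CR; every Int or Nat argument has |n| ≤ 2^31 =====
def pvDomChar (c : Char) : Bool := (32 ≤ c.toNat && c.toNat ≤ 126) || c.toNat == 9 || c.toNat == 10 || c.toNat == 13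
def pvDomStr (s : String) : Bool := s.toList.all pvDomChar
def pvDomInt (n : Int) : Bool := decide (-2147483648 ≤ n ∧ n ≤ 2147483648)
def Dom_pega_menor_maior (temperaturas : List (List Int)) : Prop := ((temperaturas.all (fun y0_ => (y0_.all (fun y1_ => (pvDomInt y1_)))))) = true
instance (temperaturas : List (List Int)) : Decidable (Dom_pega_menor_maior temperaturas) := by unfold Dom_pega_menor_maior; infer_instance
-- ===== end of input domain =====

-- B replaces A's seeded interleaved min/max loop by flattening once and two builtin min/max scans (idiomatic).


-- ===== PORT A =====
-- menor = maior = temperaturas[0][0]; Pre_ guarantees the index accesses succeed (getD 0 never used inside Pre_)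
def pega_menor_maior (temperaturas : List (List Int)) : List Int :=
  let seed : Int := (temperaturas.headD []).headD 0
  let p : Int × Int := temperaturas.foldl
    (fun (p : Int × Int) (semana : List Int) =>
      semana.foldl
        (fun (q : Int × Int) (temperatura : Int) =>
          let maior := if temperatura > q.2 then temperatura else q.2
          let menor := if temperatura < q.1 then temperatura else q.1
          (menor, maior)) p)
    (seed, seed)
  [p.1, p.2]

-- ===== PORT B =====
def pega_menor_maior_alt (temperaturas : List (List Int)) : List Int :=
  let todas : List Int := temperaturas.flatMap (fun semana => semana)
  [(PySem.List.min? todas (fun x => x)).getD 0, (PySem.List.max? todas (fun x => x)).getD 0]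

-- ===== PRECONDITION & SPEC =====
-- Pre_ excludes exactly the inputs where A raises IndexError: an empty matrix or an empty first row.
def Pre_pega_menor_maior (temperaturas : List (List Int)) : Prop :=
  temperaturas ≠ [] ∧ temperaturas.headD [] ≠ []
instance (temperaturas : List (List Int)) : Decidable (Pre_pega_menor_maior temperaturas) := by
  unfold Pre_pega_menor_maior; infer_instance
def pvWitness_pega_menor_maior : List (List Int) := [[3, -1], [7]]

def Spec_pega_menor_maior (temperaturas : List (List Int)) (out : List Int) : Prop :=
  out = pega_menor_maior_alt temperaturas
instance (temperaturas : List (List Int)) (out : List Int) : Decidable (Spec_pega_menor_maior temperaturas out) := by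
  unfold Spec_pega_menor_maior; infer_instance

-- ===== CLAIM (what is proved, stated in full; the proofs are below) =====
def Claim_equal_pega_menor_maior : Prop := ∀ (temperaturas : List (List Int)), Dom_pega_menor_maior temperaturas → Pre_pega_menor_maior temperaturas → Spec_pega_menor_maior temperaturas (pega_menor_maior temperaturas)

-- ===== LEMMAS AND PROOFS =====

-- A's nested foldl over the matrix is the foldl over the flattened list.
theorem foldl_nested_eq_flatMap {α β : Type} (f : β → α → β) :
    ∀ (ts : List (List α)) (p : β),
      ts.foldl (fun p sem => sem.foldl f p) p = (ts.flatMap (fun s => s)).foldl f p := by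
  intro ts
  induction ts with
  | nil => intro p; simp
  | cons w rest ih => intro p; simp [List.foldl_append, ih]

-- The paired min/max step splits into independent min and max folds.
theorem foldl_pair_minmax :
    ∀ (l : List Int) (a b : Int),
      l.foldl (fun (q : Int × Int) t =>
        let maior := if t > q.2 then t else q.2
        let menor := if t < q.1 then t else q.1
        (menor, maior)) (a, b)
      = (l.foldl min a, l.foldl max b) := by
  intro l
  induction l with
  | nil => intro a b; rfl
  | cons t rest ih =>
    intro a b
    have hmin : (if t < a then t else a) = min a t := by
      rw [min_def]; split_ifs <;> omega
    have hmax : (if t > b then t else b) = max b t := by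
      rw [max_def]; split_ifs <;> omega
    simp only [List.foldl_cons]
    rw [← ih]
    simp [hmin, hmax]

-- ===== VERDICT (by name: the statement is the Claim_ definition above) =====
theorem pega_menor_maior_spec : Claim_equal_pega_menor_maior := by
  intro ts _ hpre
  obtain ⟨hne, hhead⟩ := hpre
  unfold Spec_pega_menor_maior pega_menor_maior pega_menor_maior_alt
  obtain ⟨w, rest, rfl⟩ : ∃ w rest, ts = w :: rest := by
    cases ts with
    | nil => exact absurd rfl hne
    | cons a b => exact ⟨a, b, rfl⟩
  obtain ⟨t0, wrest, rfl⟩ : ∃ t0 wrest, w = t0 :: wrest := by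
    cases w with
    | nil => simp at hhead
    | cons a b => exact ⟨a, b, rfl⟩
  simp only [List.headD_cons]
  rw [foldl_nested_eq_flatMap]
  have hflat : ((t0 :: wrest) :: rest).flatMap (fun s => s)
      = t0 :: (wrest ++ rest.flatMap (fun s => s)) := by simp
  rw [hflat, foldl_pair_minmax]
  rw [PySem.List.min?_id_cons, PySem.List.max?_id_cons]
  simp [min_self, max_self]
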